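-- pv_equiv track=rewrite | github.com/langflow-ai/langflow | src/backend/base/langflow/services/specification/converter.py | _validate_type_compatibility
-- ===== SOURCE A (Python) =====
-- from typing import Any, Dict, List, Optional, Union
--
-- def _validate_type_compatibility(output_types: List[str], input_types: List[str], source_type: str, target_type: str) -> bool:
--     """Validate that output types are compatible with input types."""
--     # Check for direct type match
--     for output_type in output_types:
--         if output_type in input_types:
--             return True
--
--     # Check for compatible type hierarchies
--     compatible_mappings = {
--         "Message": ["Data", "DataFrame", "Message"],
--         "Tool": ["Tool"],
--         "PromptValue": ["Text", "PromptValue"],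
--         "Text": ["Data", "Text"],
--         "Data": ["Data", "DataFrame"]
--     }
--
--     for output_type in output_types:
--         if output_type in compatible_mappings:
--             for compatible_type in compatible_mappings[output_type]:
--                 if compatible_type in input_types:
--                     return True
--
--     return False
-- ===== SOURCE B (Python) =====
-- def _validate_type_compatibility(output_types, input_types, source_type, target_type):
--     """Validate that output types are compatible with input types."""
--     compatible_mappings = {
--         "Message": ["Data", "DataFrame", "Message"],
--         "Tool": ["Tool"],
--         "PromptValue": ["Text", "PromptValue"],
--         "Text": ["Data", "Text"],
--         "Data": ["Data", "DataFrame"]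
--     }
--     acceptable = set()
--     for output_type in output_types:
--         acceptable.add(output_type)
--         acceptable.update(compatible_mappings.get(output_type, []))
--     return bool(acceptable & set(input_types))
-- ===== Notes on version B (the rewrite author's own statement) =====
-- stated objective: simpler
-- what changed: A's two separate early-returning scans (direct match, then hierarchy match) are replaced by one pass that builds a single set of all acceptable types (each output type plus its compatible mapping) followed by one set-intersection test against the input types.
import Mathlib
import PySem

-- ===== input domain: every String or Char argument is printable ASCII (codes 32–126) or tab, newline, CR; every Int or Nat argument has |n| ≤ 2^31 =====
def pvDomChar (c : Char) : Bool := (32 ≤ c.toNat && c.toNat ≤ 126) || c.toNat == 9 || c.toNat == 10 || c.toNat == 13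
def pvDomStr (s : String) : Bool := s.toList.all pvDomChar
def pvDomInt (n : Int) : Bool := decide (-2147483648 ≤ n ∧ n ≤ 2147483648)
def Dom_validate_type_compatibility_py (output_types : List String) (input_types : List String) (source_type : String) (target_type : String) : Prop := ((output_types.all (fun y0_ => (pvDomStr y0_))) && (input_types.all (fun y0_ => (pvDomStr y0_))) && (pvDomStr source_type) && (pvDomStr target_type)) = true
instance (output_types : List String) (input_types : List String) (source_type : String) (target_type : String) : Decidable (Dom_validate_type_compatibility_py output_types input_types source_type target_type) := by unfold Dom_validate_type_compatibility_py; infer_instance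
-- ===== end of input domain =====

-- B replaces A's two early-returning scans by building one set of acceptable types and
-- intersecting it with the input types (objective: simpler, one pass + one set test).

-- the compatible-type hierarchy dict, literal in both Pythons
def pvCompatibleMappings : PySem.Dict String (List String) :=
  PySem.Dict.ofList [
    ("Message", ["Data", "DataFrame", "Message"]),
    ("Tool", ["Tool"]),
    ("PromptValue", ["Text", "PromptValue"]),
    ("Text", ["Data", "Text"]),
    ("Data", ["Data", "DataFrame"])]

-- ===== PORT A =====
def validate_type_compatibility_py (output_types : List String) (input_types : List String) (source_type : String) (target_type : String) : Bool :=
  -- first loop: direct type match, early return True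
  if output_types.any (fun output_type => input_types.contains output_type) then
    true
  -- second loop: hierarchy match via compatible_mappings, early return True
  else if output_types.any (fun output_type =>
      if pvCompatibleMappings.contains output_type then
        (pvCompatibleMappings.getD output_type []).any
          (fun compatible_type => input_types.contains compatible_type)
      else false) then
    true
  else
    false

-- ===== PORT B =====
def validate_type_compatibility_py_alt (output_types : List String) (input_types : List String) (source_type : String) (target_type : String) : Bool :=
  let acceptable : PySem.Set String :=
    output_types.foldl
      (fun s output_type =>
        PySem.Set.update (PySem.Set.add s output_type)
          (pvCompatibleMappings.getD output_type []))
      PySem.Set.empty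
  -- bool(acceptable & set(input_types))
  !(PySem.Set.inter acceptable (PySem.Set.ofList input_types)).isEmpty

-- ===== PRECONDITION & SPEC =====
def Spec_validate_type_compatibility_py (output_types : List String) (input_types : List String) (source_type : String) (target_type : String) (out : Bool) : Prop := out = validate_type_compatibility_py_alt output_types input_types source_type target_type
instance (output_types : List String) (input_types : List String) (source_type : String) (target_type : String) (out : Bool) : Decidable (Spec_validate_type_compatibility_py output_types input_types source_type target_type out) := by unfold Spec_validate_type_compatibility_py; infer_instance

-- ===== CLAIM (what is proved, stated in full; the proofs are below) =====
def Claim_equal_validate_type_compatibility_py : Prop := ∀ (output_types : List String) (input_types : List String) (source_type : String) (target_type : String), Dom_validate_type_compatibility_py output_types input_types source_type target_type → Spec_validate_type_compatibility_py output_types input_types source_type target_type (validate_type_compatibility_py output_types input_types source_type target_type)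

-- ===== LEMMAS AND PROOFS =====

-- membership in B's accumulated set
lemma mem_acceptable (output_types : List String) (s : PySem.Set String) (y : String) :
    y ∈ output_types.foldl
      (fun s output_type =>
        PySem.Set.update (PySem.Set.add s output_type)
          (pvCompatibleMappings.getD output_type []))
      s
    ↔ y ∈ s ∨ ∃ o ∈ output_types, y = o ∨ y ∈ pvCompatibleMappings.getD o [] := by
  induction output_types generalizing s with
  | nil => simp
  | cons o rest ih =>
      simp only [List.foldl_cons, ih, PySem.Set.mem_update, PySem.Set.mem_add,
        List.mem_cons]
      constructor
      · rintro (((h | h) | h) | ⟨o', ho', h⟩)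
        · exact Or.inl h
        · exact Or.inr ⟨o, Or.inl rfl, Or.inl h⟩
        · exact Or.inr ⟨o, Or.inl rfl, Or.inr h⟩
        · exact Or.inr ⟨o', Or.inr ho', h⟩
      · rintro (h | ⟨o', (rfl | ho'), (h | h)⟩)
        · exact Or.inl (Or.inl (Or.inl h))
        · exact Or.inl (Or.inl (Or.inr h))
        · exact Or.inl (Or.inr h)
        · exact Or.inr ⟨o', ho', Or.inl h⟩
        · exact Or.inr ⟨o', ho', Or.inr h⟩

-- both ports decide the same proposition
lemma both_eq (output_types input_types : List String) (source_type target_type : String) :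
    validate_type_compatibility_py output_types input_types source_type target_type
      = validate_type_compatibility_py_alt output_types input_types source_type target_type := by
  have hinner : ∀ output_type : String,
      (if pvCompatibleMappings.contains output_type then
          (pvCompatibleMappings.getD output_type []).any
            (fun compatible_type => input_types.contains compatible_type)
        else false)
      = (pvCompatibleMappings.getD output_type []).any
          (fun compatible_type => input_types.contains compatible_type) := by
    intro o
    by_cases h : pvCompatibleMappings.contains o = true
    · rw [if_pos h]
    · have h' : pvCompatibleMappings.contains o = false := Bool.eq_false_iff.mpr h
      rw [if_neg h]
      simp [pysem, h']
  have hA : validate_type_compatibility_py output_types input_types source_type target_type = true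
      ↔ (∃ o ∈ output_types, o ∈ input_types)
        ∨ (∃ o ∈ output_types, ∃ c ∈ pvCompatibleMappings.getD o [], c ∈ input_types) := by
    unfold validate_type_compatibility_py
    simp only [hinner]
    constructor
    · intro h
      split_ifs at h with h1 h2
      · exact Or.inl (by simpa [List.any_eq_true, List.contains_iff_mem] using h1)
      · exact Or.inr (by simpa [List.any_eq_true, List.contains_iff_mem] using h2)
    · intro hp
      rcases hp with h | h
      · rw [if_pos (by simpa [List.any_eq_true, List.contains_iff_mem] using h)]
      · by_cases h1 : (output_types.any fun output_type => input_types.contains output_type) = true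
        · rw [if_pos h1]
        · rw [if_neg h1, if_pos (by simpa [List.any_eq_true, List.contains_iff_mem] using h)]
  have hB : validate_type_compatibility_py_alt output_types input_types source_type target_type = true
      ↔ (∃ o ∈ output_types, o ∈ input_types)
        ∨ (∃ o ∈ output_types, ∃ c ∈ pvCompatibleMappings.getD o [], c ∈ input_types) := by
    unfold validate_type_compatibility_py_alt
    simp only [Bool.not_eq_true', List.isEmpty_eq_false_iff_exists_mem,
      PySem.Set.mem_inter, PySem.Set.mem_ofList, mem_acceptable, PySem.Set.empty,
      List.not_mem_nil, false_or]
    constructor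
    · rintro ⟨y, ⟨o, ho, hy⟩, hin⟩
      rcases hy with h | hco
      · exact Or.inl ⟨o, ho, by rwa [h] at hin⟩
      · exact Or.inr ⟨o, ho, y, hco, hin⟩
    · rintro (⟨o, ho, hin⟩ | ⟨o, ho, c, hco, hin⟩)
      · exact ⟨o, ⟨o, ho, Or.inl rfl⟩, hin⟩
      · exact ⟨c, ⟨o, ho, Or.inr hco⟩, hin⟩
  have h := hA.trans hB.symm
  by_cases hb : validate_type_compatibility_py_alt output_types input_types source_type target_type = true
  · rw [hb, h.mpr hb]
  · have hb' : validate_type_compatibility_py_alt output_types input_types source_type target_type = false :=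
      Bool.eq_false_iff.mpr hb
    have ha : validate_type_compatibility_py output_types input_types source_type target_type = false :=
      Bool.eq_false_iff.mpr (fun hA' => hb (h.mp hA'))
    rw [ha, hb']

-- ===== VERDICT (by name: the statement is the Claim_ definition above) =====
theorem validate_type_compatibility_py_spec : Claim_equal_validate_type_compatibility_py := by
  intro o i s t _
  unfold Spec_validate_type_compatibility_py
  exact both_eq o i s t
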